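-- pv_equiv track=rewrite | github.com/envlib/geotiff-to-wps | geotiff_to_wps/convert.py | find_tile_size
-- ===== SOURCE A (Python) =====
-- def find_tile_size(axis_size):
--     """Find a tile size that evenly divides the axis, preferring 1000-3000."""
--     if axis_size <= 3000:
--         return axis_size
--     for tile_size in range(3000, 999, -100):
--         if axis_size % tile_size == 0:
--             return tile_size
--     for tile_size in range(4000, 100, -1):
--         if axis_size % tile_size == 0:
--             return tile_size
--     return axis_size
-- ===== SOURCE B (Python) =====
-- def find_tile_size(axis_size):
--     """Find a tile size that evenly divides the axis, preferring 1000-3000."""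
--     if axis_size <= 3000:
--         return axis_size
--     divs = set()
--     i = 1
--     while i * i <= axis_size:
--         if axis_size % i == 0:
--             divs.add(i)
--             divs.add(axis_size // i)
--         i += 1
--     c1 = [d for d in divs if d % 100 == 0 and 1000 <= d <= 3000]
--     if c1:
--         return max(c1)
--     c2 = [d for d in divs if 101 <= d <= 4000]
--     if c2:
--         return max(c2)
--     return axis_size
-- ===== Notes on version B (the rewrite author's own statement) =====
-- stated objective: alternative
-- what changed: Replaces A's two descending candidate scans with sqrt-bounded divisor enumeration into a set followed by filtering and max over each priority class.
import Mathlib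
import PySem

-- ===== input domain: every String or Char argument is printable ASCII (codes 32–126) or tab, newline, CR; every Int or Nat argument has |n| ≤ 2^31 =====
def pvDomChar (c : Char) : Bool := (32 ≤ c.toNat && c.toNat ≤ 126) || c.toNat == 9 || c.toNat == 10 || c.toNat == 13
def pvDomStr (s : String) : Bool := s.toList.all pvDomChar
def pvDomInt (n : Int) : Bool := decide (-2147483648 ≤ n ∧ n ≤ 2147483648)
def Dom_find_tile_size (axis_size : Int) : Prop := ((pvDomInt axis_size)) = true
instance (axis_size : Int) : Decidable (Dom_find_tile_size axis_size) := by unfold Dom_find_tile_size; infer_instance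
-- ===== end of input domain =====

-- B replaces A's two descending candidate scans with a sqrt-bounded divisor enumeration
-- into a set, then filters and takes the max of each priority class (alternative algorithm).

-- ===== PORT A =====
-- each 'for' loop of A returns the first element of its range with 'axis_size % t == 0'
def find_tile_size (axis_size : Int) : Int :=
  if axis_size ≤ 3000 then axis_size
  else
    match (PySem.List.pyRange 3000 999 (-100)).find? (fun t => PySem.Int.mod axis_size t == 0) with
    | some t => t
    | none =>
      match (PySem.List.pyRange 4000 100 (-1)).find? (fun t => PySem.Int.mod axis_size t == 0) with
      | some t => t
      | none => axis_size

-- ===== PORT B =====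
-- B's while loop: i from 1 while i*i <= n, adding i and n//i to the set when i divides n
def pvDivLoop (n : Int) (i : Int) (divs : PySem.Set Int) : PySem.Set Int :=
  if h : i * i ≤ n then
    pvDivLoop n (i + 1)
      (if PySem.Int.mod n i == 0 then
        (divs.add i).add (PySem.Int.floordiv n i)
      else divs)
  else divs
termination_by (n + 1 - i).toNat
decreasing_by
  have hi : i ≤ n := by nlinarith [mul_self_nonneg i]
  omega

-- max(c1)/max(c2) are order-independent, so consuming the set's elements here is exact
def find_tile_size_alt (axis_size : Int) : Int :=
  if axis_size ≤ 3000 then axis_size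
  else
    let divs := pvDivLoop axis_size 1 (PySem.Set.ofList [])
    let c1 := divs.filter (fun d => PySem.Int.mod d 100 == 0 && decide (1000 ≤ d) && decide (d ≤ 3000))
    match PySem.List.max? c1 (fun x => x) with
    | some m => m
    | none =>
      let c2 := divs.filter (fun d => decide (101 ≤ d) && decide (d ≤ 4000))
      match PySem.List.max? c2 (fun x => x) with
      | some m => m
      | none => axis_size

-- ===== PRECONDITION & SPEC =====
def Spec_find_tile_size (axis_size : Int) (out : Int) : Prop := out = find_tile_size_alt axis_size
instance (axis_size : Int) (out : Int) : Decidable (Spec_find_tile_size axis_size out) := by unfold Spec_find_tile_size; infer_instance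

-- ===== CLAIM (what is proved, stated in full; the proofs are below) =====
def Claim_equal_find_tile_size : Prop := ∀ (axis_size : Int), Dom_find_tile_size axis_size → Spec_find_tile_size axis_size (find_tile_size axis_size)

-- ===== LEMMAS AND PROOFS =====

-- membership in the set built by B's while loop
lemma mem_pvDivLoop (n i : Int) (s : PySem.Set Int) (d : Int) (hi : 1 ≤ i) :
    d ∈ pvDivLoop n i s ↔
      d ∈ s ∨ ∃ j, i ≤ j ∧ j * j ≤ n ∧ PySem.Int.mod n j = 0 ∧
        (d = j ∨ d = PySem.Int.floordiv n j) := by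
  induction i, s using pvDivLoop.induct n with
  | case1 i s h ih =>
    rw [pvDivLoop, dif_pos h]
    by_cases hmod : (PySem.Int.mod n i == 0) = true
    · rw [if_pos hmod]
      rw [dif_pos hmod] at ih
      rw [ih (by omega)]
      have hm0 : PySem.Int.mod n i = 0 := by simpa using hmod
      constructor
      · rintro (hm | ⟨j, hj1, hj2, hj3, hj4⟩)
        · rcases (PySem.Set.mem_add _ _ _).mp hm with hm2 | heq
          · rcases (PySem.Set.mem_add _ _ _).mp hm2 with hm3 | heq
            · exact Or.inl hm3
            · exact Or.inr ⟨i, le_refl _, h, hm0, Or.inl heq⟩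
          · exact Or.inr ⟨i, le_refl _, h, hm0, Or.inr heq⟩
        · exact Or.inr ⟨j, by omega, hj2, hj3, hj4⟩
      · rintro (hm | ⟨j, hj1, hj2, hj3, hj4⟩)
        · exact Or.inl ((PySem.Set.mem_add _ _ _).mpr (Or.inl ((PySem.Set.mem_add _ _ _).mpr (Or.inl hm))))
        · rcases eq_or_lt_of_le hj1 with rfl | hlt
          · left
            rcases hj4 with rfl | rfl
            · exact (PySem.Set.mem_add _ _ _).mpr (Or.inl ((PySem.Set.mem_add _ _ _).mpr (Or.inr rfl)))
            · exact (PySem.Set.mem_add _ _ _).mpr (Or.inr rfl)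
          · exact Or.inr ⟨j, by omega, hj2, hj3, hj4⟩
    · rw [if_neg hmod]
      rw [dif_neg hmod] at ih
      rw [ih (by omega)]
      have hm0 : PySem.Int.mod n i ≠ 0 := by simpa using hmod
      constructor
      · rintro (hm | ⟨j, hj1, hj2, hj3, hj4⟩)
        · exact Or.inl hm
        · exact Or.inr ⟨j, by omega, hj2, hj3, hj4⟩
      · rintro (hm | ⟨j, hj1, hj2, hj3, hj4⟩)
        · exact Or.inl hm
        · have hne : i ≠ j := by rintro rfl; exact hm0 hj3
          exact Or.inr ⟨j, by omega, hj2, hj3, hj4⟩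
  | case2 i s h =>
    rw [pvDivLoop, dif_neg h]
    constructor
    · exact Or.inl
    · rintro (hm | ⟨j, hj1, hj2, _, _⟩)
      · exact hm
      · exact absurd hj2 (by intro hc; exact h (by nlinarith))

-- the set built by B's loop holds exactly the positive divisors of n (for n ≥ 1)
lemma mem_pvDivLoop_iff_dvd (n : Int) (hn : 1 ≤ n) (d : Int) :
    d ∈ pvDivLoop n 1 (PySem.Set.ofList []) ↔ 1 ≤ d ∧ d ∣ n := by
  rw [mem_pvDivLoop n 1 _ d le_rfl]
  constructor
  · rintro (hm | ⟨j, hj1, hj2, hj3, hj4⟩)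
    · simp [PySem.Set.ofList] at hm
    · have hjd : j ∣ n := (PySem.Int.mod_eq_zero_iff_dvd n j).mp hj3
      obtain ⟨c, hc⟩ := hjd
      have hflo : PySem.Int.floordiv n j = c := by
        rw [PySem.Int.floordiv_eq_ediv_of_pos (by omega), hc,
          Int.mul_ediv_cancel_left _ (by omega)]
      have hc1 : 1 ≤ c := by nlinarith
      rcases hj4 with rfl | rfl
      · exact ⟨hj1, ⟨c, hc⟩⟩
      · rw [hflo]; exact ⟨hc1, ⟨j, by rw [hc]; ring⟩⟩
  · rintro ⟨hd1, c, hc⟩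
    have hc1 : 1 ≤ c := by nlinarith
    right
    by_cases hdd : d * d ≤ n
    · exact ⟨d, hd1, hdd, (PySem.Int.mod_eq_zero_iff_dvd n d).mpr ⟨c, hc⟩, Or.inl rfl⟩
    · refine ⟨c, hc1, by nlinarith, (PySem.Int.mod_eq_zero_iff_dvd n c).mpr ⟨d, by rw [hc]; ring⟩, Or.inr ?_⟩
      rw [PySem.Int.floordiv_eq_ediv_of_pos (by omega), hc, mul_comm,
        Int.mul_ediv_cancel_left _ (by omega)]

lemma range1_eq : PySem.List.pyRange 3000 999 (-100) =
    [3000, 2900, 2800, 2700, 2600, 2500, 2400, 2300, 2200, 2100, 2000,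
     1900, 1800, 1700, 1600, 1500, 1400, 1300, 1200, 1100, 1000] := by decide

lemma mem_range1 (x : Int) :
    x ∈ PySem.List.pyRange 3000 999 (-100) ↔ 100 ∣ x ∧ 1000 ≤ x ∧ x ≤ 3000 := by
  rw [range1_eq]
  simp only [List.mem_cons, List.not_mem_nil, or_false]
  omega

lemma range1_pairwise : (PySem.List.pyRange 3000 999 (-100)).Pairwise (· > ·) := by
  rw [range1_eq]; decide

lemma range2_pairwise : (PySem.List.pyRange 4000 100 (-1)).Pairwise (· > ·) := by
  rw [PySem.List.pyRange_neg_one_eq_reverse, List.pairwise_reverse]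
  exact PySem.List.pairwise_lt_pyRange_one 101 4001

-- on a strictly descending list, the first match bounds every match from above
lemma find?_desc_isMax (l : List Int) (p : Int → Bool) (hl : l.Pairwise (· > ·)) (t : Int)
    (ht : l.find? p = some t) : ∀ x ∈ l, p x = true → x ≤ t := by
  induction l with
  | nil => simp
  | cons a l ih =>
    rw [List.pairwise_cons] at hl
    intro x hx hpx
    rw [List.find?_cons] at ht
    by_cases hpa : p a
    · simp only [hpa] at ht
      obtain rfl : a = t := by injection ht
      rcases List.mem_cons.mp hx with rfl | hxl
      · exact le_refl _
      · exact le_of_lt (hl.1 x hxl)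
    · simp only [Bool.not_eq_true] at hpa
      simp only [hpa] at ht
      rcases List.mem_cons.mp hx with rfl | hxl
      · exact absurd hpx (by simp [hpa])
      · exact ih hl.2 ht x hxl hpx

-- first match on a strictly descending list = max of any list with the same matching elements
lemma find?_eq_max? (l c : List Int) (p : Int → Bool) (hl : l.Pairwise (· > ·))
    (hmem : ∀ x, x ∈ c ↔ (x ∈ l ∧ p x = true)) :
    l.find? p = PySem.List.max? c (fun x => x) := by
  cases hmax : PySem.List.max? c (fun x => x) with
  | none =>
    rw [PySem.List.max?_eq_none_iff] at hmax
    rw [List.find?_eq_none]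
    intro x hx hpx
    have : x ∈ c := (hmem x).mpr ⟨hx, hpx⟩
    simp [hmax] at this
  | some m =>
    have hmc : m ∈ c := PySem.List.max?_mem hmax
    obtain ⟨hml, hpm⟩ := (hmem m).mp hmc
    cases hf : l.find? p with
    | none =>
      rw [List.find?_eq_none] at hf
      exact absurd hpm (hf m hml)
    | some t =>
      have hpt : p t = true := List.find?_some hf
      have htl : t ∈ l := List.mem_of_find?_eq_some hf
      have h1 : t ≤ m := PySem.List.max?_isMax hmax t ((hmem t).mpr ⟨htl, hpt⟩)
      have h2 : m ≤ t := find?_desc_isMax l p hl t hf m hml hpm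
      rw [le_antisymm h1 h2]

-- ===== VERDICT (by name: the statement is the Claim_ definition above) =====
theorem find_tile_size_spec : Claim_equal_find_tile_size := by
  unfold Claim_equal_find_tile_size
  intro n _
  show find_tile_size n = find_tile_size_alt n
  simp only [find_tile_size, find_tile_size_alt]
  by_cases h : n ≤ 3000
  · rw [if_pos h, if_pos h]
  · rw [if_neg h, if_neg h]
    have hn : 1 ≤ n := by omega
    have h1 : (PySem.List.pyRange 3000 999 (-100)).find? (fun t => PySem.Int.mod n t == 0)
        = PySem.List.max? ((pvDivLoop n 1 (PySem.Set.ofList [])).filter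
            (fun d => PySem.Int.mod d 100 == 0 && decide (1000 ≤ d) && decide (d ≤ 3000)))
            (fun x => x) := by
      refine find?_eq_max? _ _ _ range1_pairwise ?_
      intro x
      rw [List.mem_filter, mem_pvDivLoop_iff_dvd n hn x, mem_range1]
      simp only [Bool.and_eq_true, beq_iff_eq, decide_eq_true_eq,
        PySem.Int.mod_eq_zero_iff_dvd]
      constructor
      · rintro ⟨⟨hx1, hxd⟩, ⟨h100, h1000⟩, h3000⟩
        exact ⟨⟨h100, h1000, h3000⟩, hxd⟩
      · rintro ⟨⟨h100, h1000, h3000⟩, hxd⟩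
        exact ⟨⟨by omega, hxd⟩, ⟨h100, h1000⟩, h3000⟩
    have h2 : (PySem.List.pyRange 4000 100 (-1)).find? (fun t => PySem.Int.mod n t == 0)
        = PySem.List.max? ((pvDivLoop n 1 (PySem.Set.ofList [])).filter
            (fun d => decide (101 ≤ d) && decide (d ≤ 4000))) (fun x => x) := by
      refine find?_eq_max? _ _ _ range2_pairwise ?_
      intro x
      rw [List.mem_filter, mem_pvDivLoop_iff_dvd n hn x, PySem.List.mem_pyRange_neg_one]
      simp only [Bool.and_eq_true, beq_iff_eq, decide_eq_true_eq,
        PySem.Int.mod_eq_zero_iff_dvd]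
      constructor
      · rintro ⟨⟨hx1, hxd⟩, h101, h4000⟩
        exact ⟨⟨by omega, h4000⟩, hxd⟩
      · rintro ⟨⟨h101, h4000⟩, hxd⟩
        exact ⟨⟨by omega, hxd⟩, by omega, h4000⟩
    rw [h1, h2]
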